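-- pv_equiv track=rewrite | github.com/maksymstets/Peptide-predictor | Peptide predictor/pattern.py | trypsin_logic
-- ===== SOURCE A (Python) =====
-- def trypsin_logic(content):
--     #This function splits the sequence according to the cleavage site. Mimics trypsin behaviour.
--     cleavage_sites = []
--     for site in range(len(content) - 1):
--         cleavage = False
--         P2 = content[site - 1] if site > 0 else None
--         P1 = content[site]
--         P1_prime = content[site + 1]
--         if (P1 == 'K' or P1 == 'R'):
--             cleavage = True
--         if P1_prime == 'P':
--             if not (P1_prime == 'K' and P2 == 'W'):
--                 cleavage = False
--             elif not (P1_prime == 'R' and P2 == 'M'):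
--                 cleavage = False
--             if P1 == 'K' and P1_prime == 'D' and (P2 == 'C' or P2 == 'D'):
--                 cleavage = False
--             if P1 == 'K' and (P1_prime == 'H' or P1_prime == 'Y') and P2 == 'C':
--                 cleavage = False
--             if P1 == 'R' and P1_prime == 'K' and P2 == 'C':
--                 cleavage = False
--             if P1 == 'R' and (P1_prime == 'H' or P1_prime == 'R') and P2 == 'R':
--                 cleavage = False
--         if cleavage:
--                 cleavage_sites.append(site + 1)
--     return cleavage_sites
-- ===== SOURCE B (Python) =====
-- def trypsin_logic(content):
--     # Set algebra: positions right after a K/R residue, minus blocked positions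
--     # (indices holding 'P' and the end-of-sequence position), returned sorted.
--     n = len(content)
--     after_kr = {i + 1 for i in range(n) if content[i] in ('K', 'R')}
--     blocked = {i for i in range(n) if content[i] == 'P'} | {n}
--     return sorted(after_kr - blocked)
-- ===== Notes on version B (the rewrite author's own statement) =====
-- stated objective: alternative
-- what changed: Replaced A's single windowed index loop (whose inner 'P'-block guards are dead code) by set algebra: build the set of positions right after a K/R residue and the set of blocked positions ('P' indices plus the sequence end) in two independent comprehensions, and return the sorted set difference.
import Mathlib
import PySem

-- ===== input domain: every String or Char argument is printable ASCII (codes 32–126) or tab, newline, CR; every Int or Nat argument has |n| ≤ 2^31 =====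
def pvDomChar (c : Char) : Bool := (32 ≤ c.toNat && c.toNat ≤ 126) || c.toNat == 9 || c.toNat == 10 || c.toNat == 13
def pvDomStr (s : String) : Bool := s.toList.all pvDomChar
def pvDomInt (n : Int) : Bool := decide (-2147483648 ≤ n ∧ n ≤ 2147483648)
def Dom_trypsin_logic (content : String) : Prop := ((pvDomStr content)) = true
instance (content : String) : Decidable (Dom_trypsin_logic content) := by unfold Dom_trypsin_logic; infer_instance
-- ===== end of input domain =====

-- B replaces A's windowed index loop (with its dead 'P'-block guards) by set algebra:
-- the set of positions right after a K/R residue, minus the set of blocked positions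
-- ('P' indices and the sequence end), returned sorted; objective: alternative, same value.

-- ===== PORT A =====
-- the loop body's cleavage computation (the sequence of if-assignments), transliterated
def cleaveCore (P2 P1 P1p : Option Char) : Bool :=
  let cleavage := false
  let cleavage := if P1 = some 'K' ∨ P1 = some 'R' then true else cleavage
  let cleavage :=
    if P1p = some 'P' then
      let c :=
        if ¬ (P1p = some 'K' ∧ P2 = some 'W') then false
        else if ¬ (P1p = some 'R' ∧ P2 = some 'M') then false
        else cleavage
      let c := if P1 = some 'K' ∧ P1p = some 'D' ∧ (P2 = some 'C' ∨ P2 = some 'D') then false else c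
      let c := if P1 = some 'K' ∧ (P1p = some 'H' ∨ P1p = some 'Y') ∧ P2 = some 'C' then false else c
      let c := if P1 = some 'R' ∧ P1p = some 'K' ∧ P2 = some 'C' then false else c
      let c := if P1 = some 'R' ∧ (P1p = some 'H' ∨ P1p = some 'R') ∧ P2 = some 'R' then false else c
      c
    else cleavage
  cleavage

def aCleave (content : String) (site : Int) : Bool :=
  cleaveCore (if site > 0 then PySem.Str.pyGet? content (site - 1) else none)
    (PySem.Str.pyGet? content site) (PySem.Str.pyGet? content (site + 1))

def trypsin_logic (content : String) : List Int :=
  (PySem.List.pyRange 0 (PySem.Str.len content - 1) 1).foldl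
    (fun acc site => if aCleave content site then acc ++ [site + 1] else acc) []

-- ===== PORT B =====
def trypsin_logic_alt (content : String) : List Int :=
  let n : Int := PySem.Str.len content
  let after_kr : PySem.Set Int := PySem.Set.ofList
    ((PySem.List.pyRange 0 n 1).filterMap (fun i =>
      if PySem.Str.pyGet? content i = some 'K' ∨ PySem.Str.pyGet? content i = some 'R'
      then some (i + 1) else none))
  let blocked : PySem.Set Int := PySem.Set.union
    (PySem.Set.ofList ((PySem.List.pyRange 0 n 1).filterMap (fun i =>
      if PySem.Str.pyGet? content i = some 'P' then some i else none)))
    (PySem.Set.ofList ([n] : List Int))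
  PySem.List.sorted (PySem.Set.diff after_kr blocked) (fun x => x) false

-- ===== PRECONDITION & SPEC =====
def Spec_trypsin_logic (content : String) (out : List Int) : Prop := out = trypsin_logic_alt content
instance (content : String) (out : List Int) : Decidable (Spec_trypsin_logic content out) := by unfold Spec_trypsin_logic; infer_instance

-- ===== CLAIM (what is proved, stated in full; the proofs are below) =====
def Claim_equal_trypsin_logic : Prop := ∀ (content : String), Dom_trypsin_logic content → Spec_trypsin_logic content (trypsin_logic content)

-- ===== LEMMAS AND PROOFS =====

-- A's inner 'P' block always cancels cleavage (its first guard is vacuously taken,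
-- the remaining guards can only set False), so the body reduces to: K/R followed by non-P.
theorem cleaveCore_eq (P2 P1 P1p : Option Char) :
    cleaveCore P2 P1 P1p =
      (decide (P1 = some 'K' ∨ P1 = some 'R') && !decide (P1p = some 'P')) := by
  unfold cleaveCore
  by_cases h : P1p = some 'P' <;>
    by_cases h1 : P1 = some 'K' ∨ P1 = some 'R' <;> simp [h, h1]

theorem filter_map_eq_filterMap {α β : Type} (p : α → Bool) (f : α → β) (l : List α) :
    (l.filter p).map f = l.filterMap (fun x => if p x then some (f x) else none) := by
  induction l with
  | nil => rfl
  | cons a l ih => by_cases h : p a <;> simp [h, ih]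

-- the canonical single-pass form of A
theorem A_canon (content : String) :
    trypsin_logic content =
      ((List.range (content.toList.length - 1)).filter
        (fun k => (content.toList[k]? = some 'K' || content.toList[k]? = some 'R')
          && !(content.toList[k+1]? = some 'P'))).map (fun k : Nat => ((k : Int) + 1)) := by
  unfold trypsin_logic
  rw [PySem.List.foldl_append_if, PySem.Str.len_eq, PySem.List.pyRange_one]
  have hm : (((content.toList.length : Int)) - 1 - 0).toNat = content.toList.length - 1 := by omega
  rw [hm, List.filter_map, List.map_map]
  simp only [List.nil_append]
  have hfun : ((fun site => site + 1) ∘ fun k : Nat => (0 : Int) + (k : Int))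
      = fun k : Nat => (k : Int) + 1 := by funext k; simp
  rw [hfun]
  apply congrArg
  apply List.filter_congr
  intro k hk
  simp only [Function.comp_apply, zero_add]
  have hk' : k < content.toList.length - 1 := List.mem_range.mp hk
  rw [aCleave, cleaveCore_eq]
  have h1 : PySem.Str.pyGet? content (k : Int) = content.toList[k]? :=
    PySem.Str.pyGet?_natCast content k
  have h2 : PySem.Str.pyGet? content ((k : Int) + 1) = content.toList[k+1]? := by
    have : ((k : Int) + 1) = ((k + 1 : Nat) : Int) := by push_cast; ring
    rw [this, PySem.Str.pyGet?_natCast]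
  rw [h1, h2]
  simp

-- the canonical form of B
theorem map_filter_swap {α β : Type} (f : α → β) (q : β → Bool) (l : List α) :
    (l.map f).filter q = (l.filter (fun x => q (f x))).map f := by
  induction l with
  | nil => rfl
  | cons a l ih => by_cases h : q (f a) <;> simp [h, ih]

theorem B_canon (content : String) :
    trypsin_logic_alt content =
      ((List.range content.toList.length).filter
        (fun k => (content.toList[k]? = some 'K' || content.toList[k]? = some 'R')
          && !((k : Nat) + 1 = content.toList.length
               ∨ content.toList[k+1]? = some 'P' : Bool))).map (fun k : Nat => ((k : Int) + 1)) := by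
  have hm0 : (((content.toList.length : Int)) - 0).toNat = content.toList.length := by omega
  have hget : ∀ k : Nat, PySem.Str.pyGet? content ((0 : Int) + (k : Int)) = content.toList[k]? := by
    intro k; rw [zero_add]; exact PySem.Str.pyGet?_natCast content k
  simp only [trypsin_logic_alt, PySem.Str.len_eq, PySem.List.pyRange_one, hm0,
    List.filterMap_map, Function.comp, hget]
  set l := content.toList with hl
  set m := l.length with hmdef
  -- name the two generated lists
  have hA : (List.range m).filterMap
      (fun k : Nat => if l[k]? = some 'K' ∨ l[k]? = some 'R' then some ((0:Int) + (k:Int) + 1) else none)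
      = ((List.range m).filter (fun k => l[k]? = some 'K' || l[k]? = some 'R')).map
          (fun k : Nat => ((k : Int) + 1)) := by
    rw [filter_map_eq_filterMap]
    apply List.filterMap_congr
    intro k _
    by_cases h : l[k]? = some 'K' ∨ l[k]? = some 'R' <;> simp [h]
  have hP : (List.range m).filterMap
      (fun k : Nat => if l[k]? = some 'P' then some ((0:Int) + (k:Int)) else none)
      = ((List.range m).filter (fun k => l[k]? = some 'P')).map (fun k : Nat => ((k : Int))) := by
    rw [filter_map_eq_filterMap]
    apply List.filterMap_congr
    intro k _
    by_cases h : l[k]? = some 'P' <;> simp [h]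
  rw [hA, hP]
  set Alist := ((List.range m).filter (fun k => l[k]? = some 'K' || l[k]? = some 'R')).map
      (fun k : Nat => ((k : Int) + 1)) with hAlist
  set Plist := ((List.range m).filter (fun k => l[k]? = some 'P')).map (fun k : Nat => ((k : Int))) with hPlist
  have hApw : Alist.Pairwise (· < ·) := by
    rw [hAlist, List.pairwise_map]
    exact (List.pairwise_lt_range.filter _).imp (by intro a b h; omega)
  have hAnd : Alist.Nodup := hApw.nodup
  have hOfA : PySem.Set.ofList Alist = Alist := PySem.Set.ofList_eq_self_of_nodup _ hAnd
  rw [hOfA]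
  set blocked : PySem.Set Int :=
    PySem.Set.union (PySem.Set.ofList Plist) (PySem.Set.ofList ([(m : Int)] : List Int)) with hblk
  have hmemblk : ∀ x : Int, x ∈ blocked ↔ x ∈ Plist ∨ x = (m : Int) := by
    intro x
    rw [hblk, PySem.Set.mem_union, PySem.Set.mem_ofList, PySem.Set.mem_ofList, List.mem_singleton]
  -- the target list
  set T := Alist.filter (fun x => !(PySem.Set.contains blocked x)) with hT
  have hTpw : T.Pairwise (· < ·) := hApw.filter _
  have hTnd : T.Nodup := hTpw.nodup
  have hDnd : (PySem.Set.diff Alist blocked).Nodup := PySem.Set.nodup_diff _ _ hAnd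
  have hperm : T.Perm (PySem.Set.diff Alist blocked) := by
    rw [List.perm_ext_iff_of_nodup hTnd hDnd]
    intro x
    have hciff : (!(PySem.Set.contains blocked x)) = true ↔ x ∉ blocked := by
      simp
    rw [hT, List.mem_filter, PySem.Set.mem_diff, hciff]
  rw [PySem.List.sorted_eq_of_perm_of_pairwise_lt _ T _ hperm hTpw]
  -- now T equals the stated canonical form
  rw [hT, hAlist, map_filter_swap, List.filter_filter]
  apply congrArg
  apply List.filter_congr
  intro k hk
  have hkm : k < m := List.mem_range.mp hk
  have hcast : ((k : Int) + 1) = ((k + 1 : Nat) : Int) := by push_cast; ring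
  have hcontains : PySem.Set.contains blocked ((k : Int) + 1)
      = decide ((k + 1 = m) ∨ l[k+1]? = some 'P') := by
    rw [Bool.eq_iff_iff, PySem.Set.contains_iff, hmemblk, decide_eq_true_iff]
    constructor
    · rintro (hmem | hEq)
      · rw [hPlist, List.mem_map] at hmem
        obtain ⟨a, ha, hEq2⟩ := hmem
        rw [List.mem_filter, List.mem_range] at ha
        have haeq : a = k + 1 := by rw [hcast] at hEq2; exact_mod_cast hEq2
        right
        rw [← haeq]
        exact of_decide_eq_true ha.2
      · left
        rw [hcast] at hEq
        exact_mod_cast hEq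
    · rintro (hEq | hP')
      · right; rw [hcast, hEq]
      · left
        rw [hPlist, List.mem_map]
        obtain ⟨hlt, -⟩ := List.getElem?_eq_some_iff.mp hP'
        refine ⟨k + 1, ?_, by rw [hcast]⟩
        rw [List.mem_filter, List.mem_range]
        exact ⟨hlt, by simp [hP']⟩
  rw [hcontains, Bool.and_comm]

theorem trypsin_eq (content : String) : trypsin_logic content = trypsin_logic_alt content := by
  rw [A_canon, B_canon]
  set l := content.toList with hl
  set m := l.length with hm
  rcases Nat.eq_zero_or_pos m with h | h
  · rw [h]; simp
  · conv_rhs => rw [show m = (m - 1) + 1 by omega, List.range_succ, List.filter_append]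
    have hme : m - 1 + 1 = m := by omega
    simp only [hme]
    have hlast : List.filter (fun k => (l[k]? = some 'K' || l[k]? = some 'R')
        && !((k : Nat) + 1 = m ∨ l[k+1]? = some 'P' : Bool)) [m - 1] = [] := by
      simp [hme]
    rw [hlast, List.append_nil]
    apply congrArg
    apply List.filter_congr
    intro k hk
    have hkm : k < m - 1 := List.mem_range.mp hk
    have hne : ¬ (k + 1 = m) := by omega
    simp [hne]

-- ===== VERDICT (by name: the statement is the Claim_ definition above) =====
theorem trypsin_logic_spec : Claim_equal_trypsin_logic := by
  intro content _
  exact trypsin_eq content
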